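-- pv_equiv track=rewrite | github.com/kbichave/QuantStack | packages/quantcore/features/factory.py | get_feature_group_mapping
-- ===== SOURCE A (Python) =====
-- from typing import Dict, List, Optional
--
-- def get_feature_group_mapping(
--
--     feature_names: List[str],
-- ) -> Dict[str, str]:
--     """
--     Create mapping from feature names to their group tags.
--
--     Groups are used for aggregating feature importance by category.
--
--     Args:
--         feature_names: List of feature names
--
--     Returns:
--         Dictionary mapping feature_name -> group_tag
--     """
--     mapping = {}
--
--     for feature_name in feature_names:
--         # Determine group based on prefix or known patterns
--         if (
--             feature_name.startswith("ema_")
--             or feature_name.startswith("price_dist_")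
--             or feature_name.startswith("zscore_")
--             or feature_name.startswith("regression_")
--         ):
--             mapping[feature_name] = "ta_trend"
--         elif (
--             feature_name.startswith("rsi")
--             or feature_name.startswith("macd_")
--             or feature_name.startswith("stoch_")
--             or feature_name.startswith("momentum_")
--             or feature_name.startswith("roc_")
--         ):
--             mapping[feature_name] = "ta_momentum"
--         elif (
--             feature_name.startswith("atr")
--             or feature_name.startswith("bb_")
--             or feature_name.startswith("vol_")
--             or feature_name.startswith("realized_vol")
--         ):
--             mapping[feature_name] = "ta_volatility"
--         elif (
--             feature_name.startswith("volume_")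
--             or feature_name.startswith("obv")
--             or feature_name.startswith("vwap")
--             or feature_name.startswith("ad_")
--         ):
--             mapping[feature_name] = "ta_volume"
--         elif feature_name.startswith("tl_"):
--             mapping[feature_name] = "trendlines"
--         elif feature_name.startswith("cdl_"):
--             mapping[feature_name] = "candlestick"
--         elif feature_name.startswith("qa_trend_"):
--             mapping[feature_name] = "qa_trend"
--         elif feature_name.startswith("qa_pattern_"):
--             mapping[feature_name] = "qa_pattern"
--         elif feature_name.startswith("rrg_") or feature_name.startswith("rs_"):
--             mapping[feature_name] = "rrg"
--         elif feature_name.startswith("wave_") or feature_name.startswith("prob_"):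
--             mapping[feature_name] = "waves"
--         elif "swing" in feature_name or "trend_structure" in feature_name:
--             mapping[feature_name] = "market_structure"
--         elif feature_name.startswith("gann_"):
--             mapping[feature_name] = "gann"
--         elif feature_name.startswith("mr_"):
--             mapping[feature_name] = "mean_reversion"
--         elif feature_name.startswith("news_"):
--             mapping[feature_name] = "sentiment"
--         else:
--             # Default to "other" for unclassified features
--             mapping[feature_name] = "other"
--
--     return mapping
-- ===== SOURCE B (Python) =====
-- # Hash-indexed classifier: instead of scanning an if/elif rule chain per name, look each
-- # prefix of the name (bounded by the longest known prefix) up in one precomputed dict and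
-- # keep the lookup hit of highest priority; the two substring rules are applied afterwards
-- # as a bounded override.  No two known prefixes are nested, so at most one lookup hits.
-- _PREFIX = {
--     "ema_": (0, "ta_trend"), "price_dist_": (0, "ta_trend"),
--     "zscore_": (0, "ta_trend"), "regression_": (0, "ta_trend"),
--     "rsi": (1, "ta_momentum"), "macd_": (1, "ta_momentum"), "stoch_": (1, "ta_momentum"),
--     "momentum_": (1, "ta_momentum"), "roc_": (1, "ta_momentum"),
--     "atr": (2, "ta_volatility"), "bb_": (2, "ta_volatility"),
--     "vol_": (2, "ta_volatility"), "realized_vol": (2, "ta_volatility"),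
--     "volume_": (3, "ta_volume"), "obv": (3, "ta_volume"),
--     "vwap": (3, "ta_volume"), "ad_": (3, "ta_volume"),
--     "tl_": (4, "trendlines"), "cdl_": (5, "candlestick"),
--     "qa_trend_": (6, "qa_trend"), "qa_pattern_": (7, "qa_pattern"),
--     "rrg_": (8, "rrg"), "rs_": (8, "rrg"),
--     "wave_": (9, "waves"), "prob_": (9, "waves"),
--     "gann_": (11, "gann"), "mr_": (12, "mean_reversion"), "news_": (13, "sentiment"),
-- }
-- _MAXLEN = max(map(len, _PREFIX))
--
--
-- def get_feature_group_mapping(feature_names):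
--     mapping = {}
--     for name in feature_names:
--         pri, tag = 14, "other"
--         for L in range(1, min(_MAXLEN, len(name)) + 1):
--             hit = _PREFIX.get(name[:L])
--             if hit is not None and hit[0] < pri:
--                 pri, tag = hit
--         if ("swing" in name or "trend_structure" in name) and 10 < pri:
--             tag = "market_structure"
--         mapping[name] = tag
--     return mapping
-- ===== Notes on version B (the rewrite author's own statement) =====
-- stated objective: alternative
-- what changed: Replaced the 15-branch elif cascade with a hash-indexed classifier: a precomputed prefix->(priority, tag) dict is probed with each name's own prefixes (bounded by the longest rule prefix), keeping the best-priority hit, and the two substring rules are applied afterwards as a priority-bounded override; correctness relies on no rule prefix being a prefix of another, so at most one probe hits.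
import Mathlib
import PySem

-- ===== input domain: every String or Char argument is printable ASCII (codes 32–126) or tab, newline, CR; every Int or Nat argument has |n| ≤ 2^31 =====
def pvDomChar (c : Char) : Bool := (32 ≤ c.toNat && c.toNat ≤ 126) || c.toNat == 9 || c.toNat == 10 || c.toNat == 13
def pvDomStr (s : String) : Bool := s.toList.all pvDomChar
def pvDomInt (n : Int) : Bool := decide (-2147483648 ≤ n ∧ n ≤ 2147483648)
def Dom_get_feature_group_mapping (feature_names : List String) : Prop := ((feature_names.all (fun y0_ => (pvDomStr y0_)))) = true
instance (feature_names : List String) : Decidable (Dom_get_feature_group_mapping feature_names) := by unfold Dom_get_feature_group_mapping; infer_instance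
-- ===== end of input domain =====

-- B replaces A's 15-branch elif cascade by a hash-indexed classifier: one precomputed
-- prefix→(priority, tag) dict, a scan over the name's own prefixes keeping the
-- best-priority hit, then the two substring rules as a bounded override (objective:
-- alternative algorithm/data structure); return values are proved identical.

-- ===== PORT A =====
-- Literal transliteration of A's loop: for each name, the elif chain picks the tag, mapping[name] = tag.
def get_feature_group_mapping (feature_names : List String) : List (String × String) :=
  (feature_names.foldl (fun (mapping : PySem.Dict String String) feature_name =>
    if PySem.Str.startswith feature_name "ema_"
        || PySem.Str.startswith feature_name "price_dist_"
        || PySem.Str.startswith feature_name "zscore_"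
        || PySem.Str.startswith feature_name "regression_" then
      mapping.insert feature_name "ta_trend"
    else if PySem.Str.startswith feature_name "rsi"
        || PySem.Str.startswith feature_name "macd_"
        || PySem.Str.startswith feature_name "stoch_"
        || PySem.Str.startswith feature_name "momentum_"
        || PySem.Str.startswith feature_name "roc_" then
      mapping.insert feature_name "ta_momentum"
    else if PySem.Str.startswith feature_name "atr"
        || PySem.Str.startswith feature_name "bb_"
        || PySem.Str.startswith feature_name "vol_"
        || PySem.Str.startswith feature_name "realized_vol" then
      mapping.insert feature_name "ta_volatility"
    else if PySem.Str.startswith feature_name "volume_"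
        || PySem.Str.startswith feature_name "obv"
        || PySem.Str.startswith feature_name "vwap"
        || PySem.Str.startswith feature_name "ad_" then
      mapping.insert feature_name "ta_volume"
    else if PySem.Str.startswith feature_name "tl_" then
      mapping.insert feature_name "trendlines"
    else if PySem.Str.startswith feature_name "cdl_" then
      mapping.insert feature_name "candlestick"
    else if PySem.Str.startswith feature_name "qa_trend_" then
      mapping.insert feature_name "qa_trend"
    else if PySem.Str.startswith feature_name "qa_pattern_" then
      mapping.insert feature_name "qa_pattern"
    else if PySem.Str.startswith feature_name "rrg_"
        || PySem.Str.startswith feature_name "rs_" then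
      mapping.insert feature_name "rrg"
    else if PySem.Str.startswith feature_name "wave_"
        || PySem.Str.startswith feature_name "prob_" then
      mapping.insert feature_name "waves"
    else if PySem.Str.isIn "swing" feature_name
        || PySem.Str.isIn "trend_structure" feature_name then
      mapping.insert feature_name "market_structure"
    else if PySem.Str.startswith feature_name "gann_" then
      mapping.insert feature_name "gann"
    else if PySem.Str.startswith feature_name "mr_" then
      mapping.insert feature_name "mean_reversion"
    else if PySem.Str.startswith feature_name "news_" then
      mapping.insert feature_name "sentiment"
    else
      mapping.insert feature_name "other") PySem.Dict.empty).items

-- ===== PORT B =====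
-- Source B's _PREFIX dict: prefix -> (priority in A's chain order, tag).
def gfgmTable : PySem.Dict String (Int × String) :=
  PySem.Dict.ofList
    [ ("ema_", (0, "ta_trend")), ("price_dist_", (0, "ta_trend")),
      ("zscore_", (0, "ta_trend")), ("regression_", (0, "ta_trend")),
      ("rsi", (1, "ta_momentum")), ("macd_", (1, "ta_momentum")), ("stoch_", (1, "ta_momentum")),
      ("momentum_", (1, "ta_momentum")), ("roc_", (1, "ta_momentum")),
      ("atr", (2, "ta_volatility")), ("bb_", (2, "ta_volatility")),
      ("vol_", (2, "ta_volatility")), ("realized_vol", (2, "ta_volatility")),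
      ("volume_", (3, "ta_volume")), ("obv", (3, "ta_volume")),
      ("vwap", (3, "ta_volume")), ("ad_", (3, "ta_volume")),
      ("tl_", (4, "trendlines")), ("cdl_", (5, "candlestick")),
      ("qa_trend_", (6, "qa_trend")), ("qa_pattern_", (7, "qa_pattern")),
      ("rrg_", (8, "rrg")), ("rs_", (8, "rrg")),
      ("wave_", (9, "waves")), ("prob_", (9, "waves")),
      ("gann_", (11, "gann")), ("mr_", (12, "mean_reversion")), ("news_", (13, "sentiment")) ]

-- Source B's _MAXLEN = max(map(len, _PREFIX)).
def gfgmMaxLen : Int :=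
  PySem.List.maxD (gfgmTable.keys.map (fun p => PySem.Str.len p)) (fun x => x) 0

-- Body of Source B's inner loop: hit = _PREFIX.get(name[:L]); if hit is not None and hit[0] < pri: pri, tag = hit.
def gfgmStep (name : String) (acc : Int × String) (L : Int) : Int × String :=
  match gfgmTable.get? (PySem.Str.slice name none (some L)) with
  | some hit => if hit.1 < acc.1 then hit else acc
  | none => acc

-- Source B's inner loop: for L in range(1, min(_MAXLEN, len(name)) + 1), starting from pri, tag = 14, "other".
def gfgmScan (name : String) : Int × String :=
  (PySem.List.pyRange 1 (min gfgmMaxLen (PySem.Str.len name) + 1)).foldl (gfgmStep name) (14, "other")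

-- Source B's substring override: if ("swing" in name or "trend_structure" in name) and 10 < pri.
def gfgmClassify (name : String) : String :=
  let pr := gfgmScan name
  if (PySem.Str.isIn "swing" name || PySem.Str.isIn "trend_structure" name) && decide (10 < pr.1) then
    "market_structure"
  else pr.2

-- Source B's outer loop: mapping[name] = tag for each name.
def get_feature_group_mapping_alt (feature_names : List String) : List (String × String) :=
  (feature_names.foldl (fun (mapping : PySem.Dict String String) name =>
    mapping.insert name (gfgmClassify name)) PySem.Dict.empty).items

-- ===== PRECONDITION & SPEC =====
def Spec_get_feature_group_mapping (feature_names : List String) (out : List (String × String)) : Prop := out = get_feature_group_mapping_alt feature_names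
instance (feature_names : List String) (out : List (String × String)) : Decidable (Spec_get_feature_group_mapping feature_names out) := by unfold Spec_get_feature_group_mapping; infer_instance

-- ===== CLAIM =====
def Claim_equal_get_feature_group_mapping : Prop := ∀ (feature_names : List String), Dom_get_feature_group_mapping feature_names → Spec_get_feature_group_mapping feature_names (get_feature_group_mapping feature_names)

-- ===== LEMMAS AND PROOFS =====
-- No known prefix is a prefix of another: at most one dict lookup can hit per name.
theorem gfgm_nonNested : ∀ p ∈ gfgmTable.keys, ∀ q ∈ gfgmTable.keys,
    p.toList <+: q.toList → p = q := by decide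

theorem gfgm_entry_facts : ∀ pr ∈ gfgmTable.items,
    pr.2.1 < 14 ∧ 1 ≤ (pr.1.toList.length : Int) ∧ (pr.1.toList.length : Int) ≤ gfgmMaxLen := by
  decide

theorem gfgm_slice_prefix (n : String) (L : Int) (h0 : 0 ≤ L) :
    (PySem.Str.slice n none (some L)).toList <+: n.toList := by
  rw [PySem.Str.toList_slice, PySem.Chars.slice_eq_listSlice, PySem.List.slice_to _ h0]
  exact List.take_prefix _ _

theorem gfgm_startswith_of_prefix (n p : String) (h : p.toList <+: n.toList) :
    PySem.Str.startswith n p = true := by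
  simpa using (PySem.Chars.startswith_iff n.toList p.toList).mpr h

theorem gfgm_hit (n p : String) (h : Int × String) (hget : gfgmTable.get? p = some h)
    (hpre : PySem.Str.startswith n p = true) (L : Int) (h0 : 0 ≤ L) :
    gfgmTable.get? (PySem.Str.slice n none (some L)) = none ∨
    gfgmTable.get? (PySem.Str.slice n none (some L)) = some h := by
  cases hs : gfgmTable.get? (PySem.Str.slice n none (some L)) with
  | none => exact Or.inl rfl
  | some h' =>
    refine Or.inr ?_
    have hk : (PySem.Str.slice n none (some L)) ∈ gfgmTable.keys :=
      gfgmTable.mem_keys_of_mem_items (gfgmTable.mem_items_of_get?_eq_some hs)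
    have hpk : p ∈ gfgmTable.keys :=
      gfgmTable.mem_keys_of_mem_items (gfgmTable.mem_items_of_get?_eq_some hget)
    have hsp := gfgm_slice_prefix n L h0
    have hpp : p.toList <+: n.toList := by
      simpa using (PySem.Chars.startswith_iff n.toList p.toList).mp (by simpa using hpre)
    rcases List.prefix_or_prefix_of_prefix hsp hpp with hc | hc
    · rw [gfgm_nonNested _ hk _ hpk hc, hget] at hs; exact hs.symm
    · rw [← gfgm_nonNested _ hpk _ hk hc, hget] at hs; exact hs.symm

theorem gfgm_foldl_none (n : String) (Ls : List Int) (acc : Int × String)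
    (hn : ∀ L ∈ Ls, gfgmTable.get? (PySem.Str.slice n none (some L)) = none) :
    Ls.foldl (gfgmStep n) acc = acc := by
  induction Ls generalizing acc with
  | nil => rfl
  | cons L Ls ih =>
    have hstep : gfgmStep n acc L = acc := by
      simp [gfgmStep, hn L (by simp)]
    rw [List.foldl_cons, hstep]
    exact ih acc (fun L' hL' => hn L' (by simp [hL']))

theorem gfgm_foldl_hold (n : String) (h : Int × String) (Ls : List Int)
    (hall : ∀ L ∈ Ls, gfgmTable.get? (PySem.Str.slice n none (some L)) = none ∨
      gfgmTable.get? (PySem.Str.slice n none (some L)) = some h) :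
    Ls.foldl (gfgmStep n) h = h := by
  induction Ls with
  | nil => rfl
  | cons L Ls ih =>
    have hstep : gfgmStep n h L = h := by
      rcases hall L (by simp) with hc | hc <;> simp [gfgmStep, hc]
    rw [List.foldl_cons, hstep]
    exact ih (fun L' hL' => hall L' (by simp [hL']))

theorem gfgm_foldl_reach (n : String) (h : Int × String) (Ls : List Int) :
    ∀ acc : Int × String,
    (∀ L ∈ Ls, gfgmTable.get? (PySem.Str.slice n none (some L)) = none ∨
      gfgmTable.get? (PySem.Str.slice n none (some L)) = some h) →
    (∃ L ∈ Ls, gfgmTable.get? (PySem.Str.slice n none (some L)) = some h) →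
    h.1 < acc.1 → Ls.foldl (gfgmStep n) acc = h := by
  induction Ls with
  | nil => intro acc _ hex _; simp at hex
  | cons L Ls ih =>
    intro acc hall hex hlt
    have htail : ∀ L' ∈ Ls, gfgmTable.get? (PySem.Str.slice n none (some L')) = none ∨
        gfgmTable.get? (PySem.Str.slice n none (some L')) = some h :=
      fun L' hL' => hall L' (by simp [hL'])
    rcases hall L (by simp) with hc | hc
    · rw [List.foldl_cons, show gfgmStep n acc L = acc from by simp [gfgmStep, hc]]
      rcases hex with ⟨L', hL', hhit⟩
      rcases List.mem_cons.mp hL' with rfl | hL'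
      · rw [hc] at hhit; cases hhit
      · exact ih acc htail ⟨L', hL', hhit⟩ hlt
    · rw [List.foldl_cons, show gfgmStep n acc L = h from by simp [gfgmStep, hc, hlt]]
      exact gfgm_foldl_hold n h Ls htail

theorem gfgm_scan_match (n p : String) (h : Int × String)
    (hget : gfgmTable.get? p = some h) (hpre : PySem.Str.startswith n p = true) :
    gfgmScan n = h := by
  obtain ⟨hlt0, hl10, hl20⟩ := gfgm_entry_facts (p, h) (gfgmTable.mem_items_of_get?_eq_some hget)
  have hlt : h.1 < 14 := hlt0
  have hl1 : 1 ≤ (p.toList.length : Int) := hl10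
  have hl2 : (p.toList.length : Int) ≤ gfgmMaxLen := hl20
  have hpp : p.toList <+: n.toList := by
    simpa using (PySem.Chars.startswith_iff n.toList p.toList).mp (by simpa using hpre)
  have hlen : p.toList.length ≤ n.toList.length := hpp.length_le
  have hML : gfgmMaxLen = 12 := by decide
  have hmem : (p.toList.length : Int) ∈
      PySem.List.pyRange 1 (min gfgmMaxLen (PySem.Str.len n) + 1) := by
    rw [PySem.List.mem_pyRange_one, PySem.Str.len_eq, hML]
    rw [hML] at hl2
    omega
  have hhit : gfgmTable.get? (PySem.Str.slice n none (some (p.toList.length : Int))) = some h := by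
    have hsl : PySem.Str.slice n none (some (p.toList.length : Int)) = p := by
      apply String.ext
      rw [PySem.Str.toList_slice, PySem.Chars.slice_eq_listSlice,
        PySem.List.slice_to _ (by positivity), Int.toNat_natCast]
      exact (List.prefix_iff_eq_take.mp hpp).symm
    rw [hsl]; exact hget
  unfold gfgmScan
  exact gfgm_foldl_reach n h _ (14, "other")
    (fun L hL => gfgm_hit n p h hget hpre L
      (by have := (PySem.List.mem_pyRange_one.mp hL).1; omega))
    ⟨(p.toList.length : Int), hmem, hhit⟩ hlt

theorem gfgm_scan_none (n : String)
    (hnone : ∀ q ∈ gfgmTable.keys, PySem.Str.startswith n q = false) :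
    gfgmScan n = (14, "other") := by
  unfold gfgmScan
  apply gfgm_foldl_none
  intro L hL
  have h0 : 0 ≤ L := by have := (PySem.List.mem_pyRange_one.mp hL).1; omega
  cases hs : gfgmTable.get? (PySem.Str.slice n none (some L)) with
  | none => rfl
  | some h' =>
    exfalso
    have hk : (PySem.Str.slice n none (some L)) ∈ gfgmTable.keys :=
      gfgmTable.mem_keys_of_mem_items (gfgmTable.mem_items_of_get?_eq_some hs)
    have := hnone _ hk
    rw [gfgm_startswith_of_prefix n _ (gfgm_slice_prefix n L h0)] at this
    cases this

theorem gfgm_classify_match (n p : String) (h : Int × String)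
    (hget : gfgmTable.get? p = some h) (hpre : PySem.Str.startswith n p = true) :
    gfgmClassify n =
      if (PySem.Str.isIn "swing" n || PySem.Str.isIn "trend_structure" n) && decide (10 < h.1) then
        "market_structure"
      else h.2 := by
  unfold gfgmClassify
  rw [gfgm_scan_match n p h hget hpre]

theorem gfgm_classify_none (n : String)
    (hnone : ∀ q ∈ gfgmTable.keys, PySem.Str.startswith n q = false) :
    gfgmClassify n =
      if (PySem.Str.isIn "swing" n || PySem.Str.isIn "trend_structure" n) then
        "market_structure"
      else "other" := by
  unfold gfgmClassify
  rw [gfgm_scan_none n hnone]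
  simp

theorem gfgm_keys_eq : gfgmTable.keys =
    ["ema_", "price_dist_", "zscore_", "regression_", "rsi", "macd_", "stoch_", "momentum_",
     "roc_", "atr", "bb_", "vol_", "realized_vol", "volume_", "obv", "vwap", "ad_", "tl_",
     "cdl_", "qa_trend_", "qa_pattern_", "rrg_", "rs_", "wave_", "prob_", "gann_", "mr_",
     "news_"] := by decide

-- The per-name step of A's fold equals inserting B's classification.
set_option maxHeartbeats 2000000 in
theorem gfgm_step_eq (d : PySem.Dict String String) (n : String) :
    (if PySem.Str.startswith n "ema_"
        || PySem.Str.startswith n "price_dist_"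
        || PySem.Str.startswith n "zscore_"
        || PySem.Str.startswith n "regression_" then
      d.insert n "ta_trend"
    else if PySem.Str.startswith n "rsi"
        || PySem.Str.startswith n "macd_"
        || PySem.Str.startswith n "stoch_"
        || PySem.Str.startswith n "momentum_"
        || PySem.Str.startswith n "roc_" then
      d.insert n "ta_momentum"
    else if PySem.Str.startswith n "atr"
        || PySem.Str.startswith n "bb_"
        || PySem.Str.startswith n "vol_"
        || PySem.Str.startswith n "realized_vol" then
      d.insert n "ta_volatility"
    else if PySem.Str.startswith n "volume_"
        || PySem.Str.startswith n "obv"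
        || PySem.Str.startswith n "vwap"
        || PySem.Str.startswith n "ad_" then
      d.insert n "ta_volume"
    else if PySem.Str.startswith n "tl_" then
      d.insert n "trendlines"
    else if PySem.Str.startswith n "cdl_" then
      d.insert n "candlestick"
    else if PySem.Str.startswith n "qa_trend_" then
      d.insert n "qa_trend"
    else if PySem.Str.startswith n "qa_pattern_" then
      d.insert n "qa_pattern"
    else if PySem.Str.startswith n "rrg_"
        || PySem.Str.startswith n "rs_" then
      d.insert n "rrg"
    else if PySem.Str.startswith n "wave_"
        || PySem.Str.startswith n "prob_" then
      d.insert n "waves"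
    else if PySem.Str.isIn "swing" n
        || PySem.Str.isIn "trend_structure" n then
      d.insert n "market_structure"
    else if PySem.Str.startswith n "gann_" then
      d.insert n "gann"
    else if PySem.Str.startswith n "mr_" then
      d.insert n "mean_reversion"
    else if PySem.Str.startswith n "news_" then
      d.insert n "sentiment"
    else
      d.insert n "other") = d.insert n (gfgmClassify n) := by
  by_cases h1 : PySem.Str.startswith n "ema_" = true
  · rw [gfgm_classify_match n "ema_" (0, "ta_trend") rfl h1]
    have hd : (decide ((10:Int) < 0)) = false := rfl
    simp only [h1, hd, Bool.true_or, Bool.or_true, Bool.false_or, Bool.or_false,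
      Bool.and_false, eq_self_iff_true, Bool.false_eq_true, if_true, if_false]
  rw [Bool.not_eq_true] at h1
  by_cases h2 : PySem.Str.startswith n "price_dist_" = true
  · rw [gfgm_classify_match n "price_dist_" (0, "ta_trend") rfl h2]
    have hd : (decide ((10:Int) < 0)) = false := rfl
    simp only [h1, h2, hd, Bool.true_or, Bool.or_true, Bool.false_or, Bool.or_false,
      Bool.and_false, eq_self_iff_true, Bool.false_eq_true, if_true, if_false]
  rw [Bool.not_eq_true] at h2
  by_cases h3 : PySem.Str.startswith n "zscore_" = true
  · rw [gfgm_classify_match n "zscore_" (0, "ta_trend") rfl h3]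
    have hd : (decide ((10:Int) < 0)) = false := rfl
    simp only [h1, h2, h3, hd, Bool.true_or, Bool.or_true, Bool.false_or, Bool.or_false,
      Bool.and_false, eq_self_iff_true, Bool.false_eq_true, if_true, if_false]
  rw [Bool.not_eq_true] at h3
  by_cases h4 : PySem.Str.startswith n "regression_" = true
  · rw [gfgm_classify_match n "regression_" (0, "ta_trend") rfl h4]
    have hd : (decide ((10:Int) < 0)) = false := rfl
    simp only [h1, h2, h3, h4, hd, Bool.true_or, Bool.or_true, Bool.false_or, Bool.or_false,
      Bool.and_false, eq_self_iff_true, Bool.false_eq_true, if_true, if_false]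
  rw [Bool.not_eq_true] at h4
  by_cases h5 : PySem.Str.startswith n "rsi" = true
  · rw [gfgm_classify_match n "rsi" (1, "ta_momentum") rfl h5]
    have hd : (decide ((10:Int) < 1)) = false := rfl
    simp only [h1, h2, h3, h4, h5, hd, Bool.true_or, Bool.or_true, Bool.false_or, Bool.or_false,
      Bool.and_false, eq_self_iff_true, Bool.false_eq_true, if_true, if_false]
  rw [Bool.not_eq_true] at h5
  by_cases h6 : PySem.Str.startswith n "macd_" = true
  · rw [gfgm_classify_match n "macd_" (1, "ta_momentum") rfl h6]
    have hd : (decide ((10:Int) < 1)) = false := rfl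
    simp only [h1, h2, h3, h4, h5, h6, hd, Bool.true_or, Bool.or_true, Bool.false_or, Bool.or_false,
      Bool.and_false, eq_self_iff_true, Bool.false_eq_true, if_true, if_false]
  rw [Bool.not_eq_true] at h6
  by_cases h7 : PySem.Str.startswith n "stoch_" = true
  · rw [gfgm_classify_match n "stoch_" (1, "ta_momentum") rfl h7]
    have hd : (decide ((10:Int) < 1)) = false := rfl
    simp only [h1, h2, h3, h4, h5, h6, h7, hd, Bool.true_or, Bool.or_true, Bool.false_or, Bool.or_false,
      Bool.and_false, eq_self_iff_true, Bool.false_eq_true, if_true, if_false]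
  rw [Bool.not_eq_true] at h7
  by_cases h8 : PySem.Str.startswith n "momentum_" = true
  · rw [gfgm_classify_match n "momentum_" (1, "ta_momentum") rfl h8]
    have hd : (decide ((10:Int) < 1)) = false := rfl
    simp only [h1, h2, h3, h4, h5, h6, h7, h8, hd, Bool.true_or, Bool.or_true, Bool.false_or, Bool.or_false,
      Bool.and_false, eq_self_iff_true, Bool.false_eq_true, if_true, if_false]
  rw [Bool.not_eq_true] at h8
  by_cases h9 : PySem.Str.startswith n "roc_" = true
  · rw [gfgm_classify_match n "roc_" (1, "ta_momentum") rfl h9]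
    have hd : (decide ((10:Int) < 1)) = false := rfl
    simp only [h1, h2, h3, h4, h5, h6, h7, h8, h9, hd, Bool.true_or, Bool.or_true, Bool.false_or, Bool.or_false,
      Bool.and_false, eq_self_iff_true, Bool.false_eq_true, if_true, if_false]
  rw [Bool.not_eq_true] at h9
  by_cases h10 : PySem.Str.startswith n "atr" = true
  · rw [gfgm_classify_match n "atr" (2, "ta_volatility") rfl h10]
    have hd : (decide ((10:Int) < 2)) = false := rfl
    simp only [h1, h2, h3, h4, h5, h6, h7, h8, h9, h10, hd, Bool.true_or, Bool.or_true, Bool.false_or, Bool.or_false,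
      Bool.and_false, eq_self_iff_true, Bool.false_eq_true, if_true, if_false]
  rw [Bool.not_eq_true] at h10
  by_cases h11 : PySem.Str.startswith n "bb_" = true
  · rw [gfgm_classify_match n "bb_" (2, "ta_volatility") rfl h11]
    have hd : (decide ((10:Int) < 2)) = false := rfl
    simp only [h1, h2, h3, h4, h5, h6, h7, h8, h9, h10, h11, hd, Bool.true_or, Bool.or_true, Bool.false_or, Bool.or_false,
      Bool.and_false, eq_self_iff_true, Bool.false_eq_true, if_true, if_false]
  rw [Bool.not_eq_true] at h11
  by_cases h12 : PySem.Str.startswith n "vol_" = true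
  · rw [gfgm_classify_match n "vol_" (2, "ta_volatility") rfl h12]
    have hd : (decide ((10:Int) < 2)) = false := rfl
    simp only [h1, h2, h3, h4, h5, h6, h7, h8, h9, h10, h11, h12, hd, Bool.true_or, Bool.or_true, Bool.false_or, Bool.or_false,
      Bool.and_false, eq_self_iff_true, Bool.false_eq_true, if_true, if_false]
  rw [Bool.not_eq_true] at h12
  by_cases h13 : PySem.Str.startswith n "realized_vol" = true
  · rw [gfgm_classify_match n "realized_vol" (2, "ta_volatility") rfl h13]
    have hd : (decide ((10:Int) < 2)) = false := rfl
    simp only [h1, h2, h3, h4, h5, h6, h7, h8, h9, h10, h11, h12, h13, hd, Bool.true_or, Bool.or_true, Bool.false_or, Bool.or_false,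
      Bool.and_false, eq_self_iff_true, Bool.false_eq_true, if_true, if_false]
  rw [Bool.not_eq_true] at h13
  by_cases h14 : PySem.Str.startswith n "volume_" = true
  · rw [gfgm_classify_match n "volume_" (3, "ta_volume") rfl h14]
    have hd : (decide ((10:Int) < 3)) = false := rfl
    simp only [h1, h2, h3, h4, h5, h6, h7, h8, h9, h10, h11, h12, h13, h14, hd, Bool.true_or, Bool.or_true, Bool.false_or, Bool.or_false,
      Bool.and_false, eq_self_iff_true, Bool.false_eq_true, if_true, if_false]
  rw [Bool.not_eq_true] at h14
  by_cases h15 : PySem.Str.startswith n "obv" = true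
  · rw [gfgm_classify_match n "obv" (3, "ta_volume") rfl h15]
    have hd : (decide ((10:Int) < 3)) = false := rfl
    simp only [h1, h2, h3, h4, h5, h6, h7, h8, h9, h10, h11, h12, h13, h14, h15, hd, Bool.true_or, Bool.or_true, Bool.false_or, Bool.or_false,
      Bool.and_false, eq_self_iff_true, Bool.false_eq_true, if_true, if_false]
  rw [Bool.not_eq_true] at h15
  by_cases h16 : PySem.Str.startswith n "vwap" = true
  · rw [gfgm_classify_match n "vwap" (3, "ta_volume") rfl h16]
    have hd : (decide ((10:Int) < 3)) = false := rfl
    simp only [h1, h2, h3, h4, h5, h6, h7, h8, h9, h10, h11, h12, h13, h14, h15, h16, hd, Bool.true_or, Bool.or_true, Bool.false_or, Bool.or_false,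
      Bool.and_false, eq_self_iff_true, Bool.false_eq_true, if_true, if_false]
  rw [Bool.not_eq_true] at h16
  by_cases h17 : PySem.Str.startswith n "ad_" = true
  · rw [gfgm_classify_match n "ad_" (3, "ta_volume") rfl h17]
    have hd : (decide ((10:Int) < 3)) = false := rfl
    simp only [h1, h2, h3, h4, h5, h6, h7, h8, h9, h10, h11, h12, h13, h14, h15, h16, h17, hd, Bool.true_or, Bool.or_true, Bool.false_or, Bool.or_false,
      Bool.and_false, eq_self_iff_true, Bool.false_eq_true, if_true, if_false]
  rw [Bool.not_eq_true] at h17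
  by_cases h18 : PySem.Str.startswith n "tl_" = true
  · rw [gfgm_classify_match n "tl_" (4, "trendlines") rfl h18]
    have hd : (decide ((10:Int) < 4)) = false := rfl
    simp only [h1, h2, h3, h4, h5, h6, h7, h8, h9, h10, h11, h12, h13, h14, h15, h16, h17, h18, hd, Bool.true_or, Bool.or_true, Bool.false_or, Bool.or_false,
      Bool.and_false, eq_self_iff_true, Bool.false_eq_true, if_true, if_false]
  rw [Bool.not_eq_true] at h18
  by_cases h19 : PySem.Str.startswith n "cdl_" = true
  · rw [gfgm_classify_match n "cdl_" (5, "candlestick") rfl h19]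
    have hd : (decide ((10:Int) < 5)) = false := rfl
    simp only [h1, h2, h3, h4, h5, h6, h7, h8, h9, h10, h11, h12, h13, h14, h15, h16, h17, h18, h19, hd, Bool.true_or, Bool.or_true, Bool.false_or, Bool.or_false,
      Bool.and_false, eq_self_iff_true, Bool.false_eq_true, if_true, if_false]
  rw [Bool.not_eq_true] at h19
  by_cases h20 : PySem.Str.startswith n "qa_trend_" = true
  · rw [gfgm_classify_match n "qa_trend_" (6, "qa_trend") rfl h20]
    have hd : (decide ((10:Int) < 6)) = false := rfl
    simp only [h1, h2, h3, h4, h5, h6, h7, h8, h9, h10, h11, h12, h13, h14, h15, h16, h17, h18, h19, h20, hd, Bool.true_or, Bool.or_true, Bool.false_or, Bool.or_false,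
      Bool.and_false, eq_self_iff_true, Bool.false_eq_true, if_true, if_false]
  rw [Bool.not_eq_true] at h20
  by_cases h21 : PySem.Str.startswith n "qa_pattern_" = true
  · rw [gfgm_classify_match n "qa_pattern_" (7, "qa_pattern") rfl h21]
    have hd : (decide ((10:Int) < 7)) = false := rfl
    simp only [h1, h2, h3, h4, h5, h6, h7, h8, h9, h10, h11, h12, h13, h14, h15, h16, h17, h18, h19, h20, h21, hd, Bool.true_or, Bool.or_true, Bool.false_or, Bool.or_false,
      Bool.and_false, eq_self_iff_true, Bool.false_eq_true, if_true, if_false]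
  rw [Bool.not_eq_true] at h21
  by_cases h22 : PySem.Str.startswith n "rrg_" = true
  · rw [gfgm_classify_match n "rrg_" (8, "rrg") rfl h22]
    have hd : (decide ((10:Int) < 8)) = false := rfl
    simp only [h1, h2, h3, h4, h5, h6, h7, h8, h9, h10, h11, h12, h13, h14, h15, h16, h17, h18, h19, h20, h21, h22, hd, Bool.true_or, Bool.or_true, Bool.false_or, Bool.or_false,
      Bool.and_false, eq_self_iff_true, Bool.false_eq_true, if_true, if_false]
  rw [Bool.not_eq_true] at h22
  by_cases h23 : PySem.Str.startswith n "rs_" = true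
  · rw [gfgm_classify_match n "rs_" (8, "rrg") rfl h23]
    have hd : (decide ((10:Int) < 8)) = false := rfl
    simp only [h1, h2, h3, h4, h5, h6, h7, h8, h9, h10, h11, h12, h13, h14, h15, h16, h17, h18, h19, h20, h21, h22, h23, hd, Bool.true_or, Bool.or_true, Bool.false_or, Bool.or_false,
      Bool.and_false, eq_self_iff_true, Bool.false_eq_true, if_true, if_false]
  rw [Bool.not_eq_true] at h23
  by_cases h24 : PySem.Str.startswith n "wave_" = true
  · rw [gfgm_classify_match n "wave_" (9, "waves") rfl h24]
    have hd : (decide ((10:Int) < 9)) = false := rfl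
    simp only [h1, h2, h3, h4, h5, h6, h7, h8, h9, h10, h11, h12, h13, h14, h15, h16, h17, h18, h19, h20, h21, h22, h23, h24, hd, Bool.true_or, Bool.or_true, Bool.false_or, Bool.or_false,
      Bool.and_false, eq_self_iff_true, Bool.false_eq_true, if_true, if_false]
  rw [Bool.not_eq_true] at h24
  by_cases h25 : PySem.Str.startswith n "prob_" = true
  · rw [gfgm_classify_match n "prob_" (9, "waves") rfl h25]
    have hd : (decide ((10:Int) < 9)) = false := rfl
    simp only [h1, h2, h3, h4, h5, h6, h7, h8, h9, h10, h11, h12, h13, h14, h15, h16, h17, h18, h19, h20, h21, h22, h23, h24, h25, hd, Bool.true_or, Bool.or_true, Bool.false_or, Bool.or_false,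
      Bool.and_false, eq_self_iff_true, Bool.false_eq_true, if_true, if_false]
  rw [Bool.not_eq_true] at h25
  by_cases h26 : PySem.Str.startswith n "gann_" = true
  · rw [gfgm_classify_match n "gann_" (11, "gann") rfl h26]
    have hd : (decide ((10:Int) < 11)) = true := rfl
    simp only [h1, h2, h3, h4, h5, h6, h7, h8, h9, h10, h11, h12, h13, h14, h15, h16, h17, h18, h19, h20, h21, h22, h23, h24, h25, h26, hd, Bool.true_or, Bool.or_true, Bool.false_or, Bool.or_false,
      Bool.and_true, apply_ite (d.insert n), eq_self_iff_true, Bool.false_eq_true, if_true, if_false]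
  rw [Bool.not_eq_true] at h26
  by_cases h27 : PySem.Str.startswith n "mr_" = true
  · rw [gfgm_classify_match n "mr_" (12, "mean_reversion") rfl h27]
    have hd : (decide ((10:Int) < 12)) = true := rfl
    simp only [h1, h2, h3, h4, h5, h6, h7, h8, h9, h10, h11, h12, h13, h14, h15, h16, h17, h18, h19, h20, h21, h22, h23, h24, h25, h26, h27, hd, Bool.true_or, Bool.or_true, Bool.false_or, Bool.or_false,
      Bool.and_true, apply_ite (d.insert n), eq_self_iff_true, Bool.false_eq_true, if_true, if_false]
  rw [Bool.not_eq_true] at h27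
  by_cases h28 : PySem.Str.startswith n "news_" = true
  · rw [gfgm_classify_match n "news_" (13, "sentiment") rfl h28]
    have hd : (decide ((10:Int) < 13)) = true := rfl
    simp only [h1, h2, h3, h4, h5, h6, h7, h8, h9, h10, h11, h12, h13, h14, h15, h16, h17, h18, h19, h20, h21, h22, h23, h24, h25, h26, h27, h28, hd, Bool.true_or, Bool.or_true, Bool.false_or, Bool.or_false,
      Bool.and_true, apply_ite (d.insert n), eq_self_iff_true, Bool.false_eq_true, if_true, if_false]
  rw [Bool.not_eq_true] at h28
  have hnone : ∀ q ∈ gfgmTable.keys, PySem.Str.startswith n q = false := by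
    rw [gfgm_keys_eq]
    exact List.forall_mem_cons.mpr ⟨h1, List.forall_mem_cons.mpr ⟨h2, List.forall_mem_cons.mpr ⟨h3, List.forall_mem_cons.mpr ⟨h4, List.forall_mem_cons.mpr ⟨h5, List.forall_mem_cons.mpr ⟨h6, List.forall_mem_cons.mpr ⟨h7, List.forall_mem_cons.mpr ⟨h8, List.forall_mem_cons.mpr ⟨h9, List.forall_mem_cons.mpr ⟨h10, List.forall_mem_cons.mpr ⟨h11, List.forall_mem_cons.mpr ⟨h12, List.forall_mem_cons.mpr ⟨h13, List.forall_mem_cons.mpr ⟨h14, List.forall_mem_cons.mpr ⟨h15, List.forall_mem_cons.mpr ⟨h16, List.forall_mem_cons.mpr ⟨h17, List.forall_mem_cons.mpr ⟨h18, List.forall_mem_cons.mpr ⟨h19, List.forall_mem_cons.mpr ⟨h20, List.forall_mem_cons.mpr ⟨h21, List.forall_mem_cons.mpr ⟨h22, List.forall_mem_cons.mpr ⟨h23, List.forall_mem_cons.mpr ⟨h24, List.forall_mem_cons.mpr ⟨h25, List.forall_mem_cons.mpr ⟨h26, List.forall_mem_cons.mpr ⟨h27, List.forall_mem_cons.mpr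 ⟨h28, List.forall_mem_nil _⟩⟩⟩⟩⟩⟩⟩⟩⟩⟩⟩⟩⟩⟩⟩⟩⟩⟩⟩⟩⟩⟩⟩⟩⟩⟩⟩⟩
  rw [gfgm_classify_none n hnone]
  simp only [h1, h2, h3, h4, h5, h6, h7, h8, h9, h10, h11, h12, h13, h14, h15, h16, h17, h18, h19, h20, h21, h22, h23, h24, h25, h26, h27, h28, Bool.false_or, Bool.or_false, Bool.false_eq_true, if_false,
    apply_ite (d.insert n)]

-- ===== VERDICT =====
theorem get_feature_group_mapping_spec : Claim_equal_get_feature_group_mapping := by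
  intro feature_names _
  unfold Spec_get_feature_group_mapping get_feature_group_mapping get_feature_group_mapping_alt
  simp only [gfgm_step_eq]
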